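-- pv_equiv track=rewrite | github.com/hannulatuomas/AI_Playground | AI Agents/ai-coder-cli/agents/languages/csharp/debug_agent.py | _detect_operation
-- ===== SOURCE A (Python) =====
-- def _detect_operation(task: str) -> str:
--     """Detect debug operation from task description."""
--     task_lower = task.lower()
--
--     if any(word in task_lower for word in ['breakpoint', 'break at', 'stop at']):
--         if 'clear' in task_lower or 'remove' in task_lower:
--             return 'clear_breakpoint'
--         elif 'list' in task_lower or 'show' in task_lower:
--             return 'list_breakpoints'
--         else:
--             return 'set_breakpoint'
--     elif 'stack' in task_lower or 'trace' in task_lower: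
--         return 'analyze_stack'
--     elif any(word in task_lower for word in ['variable', 'inspect', 'value', 'watch']):
--         return 'inspect_variables'
--     elif 'exception' in task_lower or 'error' in task_lower or 'crash' in task_lower:
--         return 'debug_exception'
--     elif 'memory' in task_lower or 'leak' in task_lower or 'disposal' in task_lower:
--         return 'memory_analysis'
--
--     return 'llm_assisted'
-- ===== SOURCE B (Python) =====
-- # Staged classifier: evaluate ALL keyword groups, collect matched group indices, pick the minimum
-- # (priority = table position) instead of an early-return if/elif cascade.
-- _GROUPS = (
--     ('breakpoint', 'break at', 'stop at'),
--     ('stack', 'trace'),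
--     ('variable', 'inspect', 'value', 'watch'),
--     ('exception', 'error', 'crash'),
--     ('memory', 'leak', 'disposal'),
-- )
-- _LABELS = ('analyze_stack', 'inspect_variables', 'debug_exception',
--            'memory_analysis', 'llm_assisted')
-- _BP_GROUPS = (('clear', 'remove'), ('list', 'show'))
-- _BP_LABELS = ('clear_breakpoint', 'list_breakpoints', 'set_breakpoint')
--
-- def _detect_operation(task: str) -> str:
--     t = task.lower()
--     hits = [i for i, ws in enumerate(_GROUPS) if any(w in t for w in ws)]
--     best = min(hits, default=len(_GROUPS))
--     if best == 0:
--         sub = [i for i, ws in enumerate(_BP_GROUPS) if any(w in t for w in ws)]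
--         return _BP_LABELS[min(sub, default=2)]
--     return _LABELS[best - 1]
-- ===== Notes on version B (the rewrite author's own statement) =====
-- stated objective: alternative
-- what changed: Instead of an early-return if/elif cascade, B evaluates every keyword group, collects the indices of all matching groups, and selects the result by the minimum matched index (priority), with the same staged min-selection for the breakpoint sub-case.
import Mathlib
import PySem

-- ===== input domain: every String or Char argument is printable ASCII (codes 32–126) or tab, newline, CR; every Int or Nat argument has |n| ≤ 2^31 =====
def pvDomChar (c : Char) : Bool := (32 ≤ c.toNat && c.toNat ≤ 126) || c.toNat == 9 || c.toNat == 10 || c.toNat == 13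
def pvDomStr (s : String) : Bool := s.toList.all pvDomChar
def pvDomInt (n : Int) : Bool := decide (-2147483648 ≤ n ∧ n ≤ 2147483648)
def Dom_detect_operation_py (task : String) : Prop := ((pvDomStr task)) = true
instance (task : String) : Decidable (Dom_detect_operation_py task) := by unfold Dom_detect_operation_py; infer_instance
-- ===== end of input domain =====

-- B evaluates every keyword group, collects the matched group indices, and decides by the
-- minimum matched index instead of A's early-return if/elif cascade (alternative, not faster).

-- ===== PORT A =====
def detect_operation_py (task : String) : String :=
  let task_lower := PySem.Str.lower task
  if ["breakpoint", "break at", "stop at"].any (fun w => PySem.Str.isIn w task_lower) then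
    if PySem.Str.isIn "clear" task_lower || PySem.Str.isIn "remove" task_lower then
      "clear_breakpoint"
    else if PySem.Str.isIn "list" task_lower || PySem.Str.isIn "show" task_lower then
      "list_breakpoints"
    else
      "set_breakpoint"
  else if PySem.Str.isIn "stack" task_lower || PySem.Str.isIn "trace" task_lower then
    "analyze_stack"
  else if ["variable", "inspect", "value", "watch"].any (fun w => PySem.Str.isIn w task_lower) then
    "inspect_variables"
  else if PySem.Str.isIn "exception" task_lower || PySem.Str.isIn "error" task_lower || PySem.Str.isIn "crash" task_lower then
    "debug_exception"
  else if PySem.Str.isIn "memory" task_lower || PySem.Str.isIn "leak" task_lower || PySem.Str.isIn "disposal" task_lower then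
    "memory_analysis"
  else
    "llm_assisted"

-- ===== PORT B =====
def pvGroups : List (List String) :=
  [ ["breakpoint", "break at", "stop at"],
    ["stack", "trace"],
    ["variable", "inspect", "value", "watch"],
    ["exception", "error", "crash"],
    ["memory", "leak", "disposal"] ]

def pvLabels : List String :=
  ["analyze_stack", "inspect_variables", "debug_exception", "memory_analysis", "llm_assisted"]

def pvBpGroups : List (List String) := [["clear", "remove"], ["list", "show"]]

def pvBpLabels : List String := ["clear_breakpoint", "list_breakpoints", "set_breakpoint"]

def detect_operation_py_alt (task : String) : String :=
  let t := PySem.Str.lower task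
  let hits := (PySem.List.enumerate pvGroups).filterMap
      (fun p => if p.2.any (fun w => PySem.Str.isIn w t) then some p.1 else none)
  let best := PySem.List.minD hits id (pvGroups.length : Int)
  if best = 0 then
    let sub := (PySem.List.enumerate pvBpGroups).filterMap
        (fun p => if p.2.any (fun w => PySem.Str.isIn w t) then some p.1 else none)
    -- index is always in range (0, 1 or 2), so the .getD "" default is never used
    (PySem.List.pyGet? pvBpLabels (PySem.List.minD sub id 2)).getD ""
  else
    (PySem.List.pyGet? pvLabels (best - 1)).getD ""

-- ===== PRECONDITION & SPEC =====
def Spec_detect_operation_py (task : String) (out : String) : Prop := out = detect_operation_py_alt task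
instance (task : String) (out : String) : Decidable (Spec_detect_operation_py task out) := by unfold Spec_detect_operation_py; infer_instance

-- ===== CLAIM (what is proved, stated in full; the proofs are below) =====
def Claim_equal_detect_operation_py : Prop := ∀ (task : String), Dom_detect_operation_py task → Spec_detect_operation_py task (detect_operation_py task)

-- ===== LEMMAS AND PROOFS =====

-- ===== VERDICT (by name: the statement is the Claim_ definition above) =====
theorem detect_operation_py_spec : Claim_equal_detect_operation_py := by
  intro task _
  unfold Spec_detect_operation_py detect_operation_py detect_operation_py_alt
  simp only [pvGroups, pvBpGroups, pvLabels, pvBpLabels, PySem.List.enumerate_cons,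
    PySem.List.enumerate_nil, List.filterMap_cons, List.filterMap_nil, List.any_cons,
    List.any_nil, Bool.or_false, Bool.or_assoc]
  generalize (PySem.Str.isIn "breakpoint" (PySem.Str.lower task) || (PySem.Str.isIn "break at" (PySem.Str.lower task) || PySem.Str.isIn "stop at" (PySem.Str.lower task))) = c0
  generalize (PySem.Str.isIn "stack" (PySem.Str.lower task) || PySem.Str.isIn "trace" (PySem.Str.lower task)) = c1
  generalize (PySem.Str.isIn "variable" (PySem.Str.lower task) || (PySem.Str.isIn "inspect" (PySem.Str.lower task) || (PySem.Str.isIn "value" (PySem.Str.lower task) || PySem.Str.isIn "watch" (PySem.Str.lower task)))) = c2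
  generalize (PySem.Str.isIn "exception" (PySem.Str.lower task) || (PySem.Str.isIn "error" (PySem.Str.lower task) || PySem.Str.isIn "crash" (PySem.Str.lower task))) = c3
  generalize (PySem.Str.isIn "memory" (PySem.Str.lower task) || (PySem.Str.isIn "leak" (PySem.Str.lower task) || PySem.Str.isIn "disposal" (PySem.Str.lower task))) = c4
  generalize (PySem.Str.isIn "clear" (PySem.Str.lower task) || PySem.Str.isIn "remove" (PySem.Str.lower task)) = c5
  generalize (PySem.Str.isIn "list" (PySem.Str.lower task) || PySem.Str.isIn "show" (PySem.Str.lower task)) = c6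
  revert c0 c1 c2 c3 c4 c5 c6
  decide
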